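-- pv_equiv track=rewrite | github.com/Gribek/CS50s-Introduction-to-Artificial-Intelligence-with-Python | project_2/pagerank/pagerank.py | links_to_page
-- ===== SOURCE A (Python) =====
-- def links_to_page(corpus):
--     """
--     Return dictionary mapping page name to a set of all pages
--     possessing link to that page.
--     """
--     result = dict()
--     for page in corpus:
--         links = set()
--         for key in corpus:
--             if page in corpus[key]:
--                 links.add(key)
--         result[page] = links
--
--     return result
-- ===== SOURCE B (Python) =====
-- def links_to_page(corpus):
--     """
--     Return dictionary mapping page name to a set of all pages
--     possessing link to that page.
--
--     Single pass over each page's outgoing links (O(P + E)) instead of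
--     scanning the whole corpus for every page (O(P^2)).
--     """
--     result = {page: set() for page in corpus}
--     for page, linked in corpus.items():
--         for target in linked:
--             if target in result:
--                 result[target].add(page)
--     return result
-- ===== Notes on version B (the rewrite author's own statement) =====
-- stated objective: faster
-- what changed: Instead of scanning every page's link list once per page (nested loops over the corpus), B initialises an empty set per page and makes one pass over all outgoing links, appending the source page to its target's set.
import Mathlib
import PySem

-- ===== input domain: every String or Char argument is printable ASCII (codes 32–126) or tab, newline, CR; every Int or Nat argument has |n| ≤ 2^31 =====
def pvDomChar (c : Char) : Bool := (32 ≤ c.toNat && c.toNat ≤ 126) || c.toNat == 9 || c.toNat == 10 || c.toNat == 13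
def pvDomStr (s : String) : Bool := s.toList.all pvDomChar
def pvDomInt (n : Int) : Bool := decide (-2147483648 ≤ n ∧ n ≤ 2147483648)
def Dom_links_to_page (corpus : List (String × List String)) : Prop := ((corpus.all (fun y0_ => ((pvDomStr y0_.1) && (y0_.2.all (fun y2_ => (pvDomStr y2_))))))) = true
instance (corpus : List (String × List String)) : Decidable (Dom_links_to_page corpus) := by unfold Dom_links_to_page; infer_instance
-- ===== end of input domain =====

-- B replaces A's per-page scan of the whole corpus by one pass over each page's outgoing
-- links, appending the source page to the target's set (objective: faster, O(P+E) vs O(P·E)).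

-- ===== PORT A =====
-- A: for each page (dict key), scan every key of the corpus and collect those whose
-- link list contains the page.  'corpus[key]' is ported as getD: key is drawn from the
-- dict's own keys, so the lookup always succeeds and the default is never used (exact).
def links_to_page (corpus : List (String × List String)) : List (String × List String) :=
  let d := PySem.Dict.ofList corpus
  (d.keys.foldl (fun result page =>
      result.insert page
        (d.keys.foldl (fun links key =>
            if page ∈ d.getD key [] then PySem.Set.add links key else links)
          PySem.Set.empty))
    PySem.Dict.empty).items

-- ===== PORT B =====
-- B: initialise every page with an empty set, then one pass over the items; for every
-- outgoing link whose target is a corpus page, add the source page to the target's set.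
-- 'result[target].add(page)' (in-place set mutation under 'target in result') is ported
-- as insert of the updated set: the key is contained, so getD's default is never used (exact).
def links_to_page_alt (corpus : List (String × List String)) : List (String × List String) :=
  let d := PySem.Dict.ofList corpus
  let init := d.keys.foldl (fun r page => r.insert page (PySem.Set.empty : PySem.Set String))
    PySem.Dict.empty
  (d.items.foldl (fun r p =>
      p.2.foldl (fun r target =>
          if r.contains target then
            r.insert target (PySem.Set.add (r.getD target []) p.1)
          else r)
        r)
    init).items

-- ===== PRECONDITION & SPEC =====
def Spec_links_to_page (corpus : List (String × List String)) (out : List (String × List String)) : Prop := out = links_to_page_alt corpus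
instance (corpus : List (String × List String)) (out : List (String × List String)) : Decidable (Spec_links_to_page corpus out) := by unfold Spec_links_to_page; infer_instance

-- ===== CLAIM (what is proved, stated in full; the proofs are below) =====
def Claim_equal_links_to_page : Prop := ∀ (corpus : List (String × List String)), Dom_links_to_page corpus → Spec_links_to_page corpus (links_to_page corpus)

-- ===== LEMMAS AND PROOFS =====

-- B's inner loop over one link list: each existing entry p gets the source key added
-- exactly when p occurs among the links (Set.add absorbs repeated occurrences).
theorem linksB_inner (key : String) (links : List String)
    (r : PySem.Dict String (List String)) (hr : r.keys.Nodup) :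
    (links.foldl (fun r t =>
        if r.contains t then r.insert t (PySem.Set.add (r.getD t []) key) else r) r).items
      = r.items.map (fun kv => (kv.1, if kv.1 ∈ links then PySem.Set.add kv.2 key else kv.2)) := by
  induction links generalizing r with
  | nil => simp
  | cons t ts ih =>
    simp only [List.foldl_cons]
    by_cases ht : r.contains t = true
    · rw [if_pos ht]
      have hkeys := PySem.Dict.keys_insert_of_contains r (PySem.Set.add (r.getD t []) key) ht
      rw [ih _ (by rw [hkeys]; exact hr)]
      rw [PySem.Dict.items_insert_of_contains r _ ht, List.map_map]
      apply List.map_congr_left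
      intro kv hkv
      by_cases hk : kv.1 = t
      · have hval : r.getD t [] = kv.2 := by
          have : (t, kv.2) ∈ r.items := by rw [← hk]; simpa using hkv
          exact PySem.Dict.getD_of_mem_items r this hr []
        simp [Function.comp, hk, hval]
      · simp [Function.comp, hk, List.mem_cons]
    · rw [if_neg ht, ih r hr]
      apply List.map_congr_left
      intro kv hkv
      have hk : kv.1 ≠ t := by
        intro h
        exact ht ((PySem.Dict.contains_iff_mem_keys r t).mpr
          (h ▸ List.mem_map_of_mem hkv))
      simp [hk, List.mem_cons]

-- B's outer loop: folding the inner loop over the item list rewrites every entry's set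
-- by the corresponding per-page fold over the items.
theorem linksB_outer (l : List (String × List String))
    (r : PySem.Dict String (List String)) (hr : r.keys.Nodup) :
    (l.foldl (fun r p =>
        p.2.foldl (fun r t =>
            if r.contains t then r.insert t (PySem.Set.add (r.getD t []) p.1) else r) r) r).items
      = r.items.map (fun kv =>
          (kv.1, l.foldl (fun s p => if kv.1 ∈ p.2 then PySem.Set.add s p.1 else s) kv.2)) := by
  induction l generalizing r with
  | nil => simp
  | cons p ps ih =>
    simp only [List.foldl_cons]
    have hitems := linksB_inner p.1 p.2 r hr
    have hkeys : (p.2.foldl (fun r t =>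
        if r.contains t then r.insert t (PySem.Set.add (r.getD t []) p.1) else r) r).keys
        = r.keys := by
      simp [PySem.Dict.keys, hitems, List.map_map, Function.comp]
    rw [ih _ (by rw [hkeys]; exact hr), hitems, List.map_map]
    apply List.map_congr_left
    intro kv _
    simp [Function.comp]

-- ===== VERDICT (by name: the statement is the Claim_ definition above) =====
theorem links_to_page_spec : Claim_equal_links_to_page := by
  intro corpus _
  unfold Spec_links_to_page links_to_page links_to_page_alt
  simp only []
  set d := PySem.Dict.ofList corpus with hd
  have hnd : d.keys.Nodup := PySem.Dict.nodup_keys_ofList corpus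
  have hfreshA := PySem.Dict.items_foldl_insert_fresh (d := PySem.Dict.empty) d.keys
    (fun a => a)
    (fun page => d.keys.foldl (fun links key =>
        if page ∈ d.getD key [] then PySem.Set.add links key else links) PySem.Set.empty)
    (by intro a _; simp) (by simpa using hnd)
  have hfreshB := PySem.Dict.items_foldl_insert_fresh (d := PySem.Dict.empty) d.keys
    (fun a => a) (fun _ => (PySem.Set.empty : PySem.Set String))
    (by intro a _; simp) (by simpa using hnd)
  have hempty : (PySem.Dict.empty : PySem.Dict String (List String)).items = [] := rfl
  beta_reduce at hfreshA hfreshB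
  rw [hfreshA]
  set init := d.keys.foldl (fun r page =>
      r.insert page (PySem.Set.empty : PySem.Set String)) PySem.Dict.empty with hinit
  have hinitkeys : init.keys = d.keys := by
    have h1 : init.keys = init.items.map (·.1) := rfl
    rw [h1, hfreshB, hempty, List.nil_append, List.map_map]
    simp [Function.comp_def]
  rw [linksB_outer d.items init (by rw [hinitkeys]; exact hnd), hfreshB]
  simp only [hempty, List.nil_append, List.map_map]
  apply List.map_congr_left
  intro page _
  simp only [Function.comp]
  refine congrArg (fun s => (page, s)) ?_
  have hkeysmap : d.keys = d.items.map (·.1) := rfl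
  rw [hkeysmap, List.foldl_map]
  apply PySem.List.foldl_congr_mem
  intro acc kv hkv
  have hval : d.getD kv.1 [] = kv.2 :=
    PySem.Dict.getD_of_mem_items d (by simpa using hkv) hnd []
  rw [hval]
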